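-- pv_equiv track=rewrite | github.com/sunsetsobserver/chain-of-thoughts | Generator_working_files/chain_of_thoughts_6.py | agg_find_band_for_midi
-- ===== SOURCE A (Python) =====
-- from typing import Dict, List, Tuple
--
-- def agg_find_band_for_midi(m: int, bands: List[dict]) -> int:
--     # choose the containing band nearest to its center; if none contain, choose nearest by range distance
--     containing = [(i, b) for i, b in enumerate(bands) if b["midi_lo"] <= m <= b["midi_hi"]]
--     if containing:
--         i, _ = min(containing, key=lambda ib: abs(m - ((ib[1]["midi_lo"] + ib[1]["midi_hi"]) // 2)))
--         return i
--     def dist_to_range(b):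
--         if m < b["midi_lo"]: return b["midi_lo"] - m
--         if m > b["midi_hi"]: return m - b["midi_hi"]
--         return 0
--     i, _ = min(enumerate(bands), key=lambda ib: dist_to_range(ib[1]))
--     return i
-- ===== SOURCE B (Python) =====
-- def agg_find_band_for_midi(m, bands):
--     # rank every band once on a lexicographic scale (containment flag, distance)
--     # and take the single argmin; no filtering, no second selection pass.
--     def rank(b):
--         lo = b["midi_lo"]
--         if m < lo:
--             return (1, lo - m)
--         hi = b["midi_hi"]
--         if m > hi:
--             return (1, m - hi)
--         return (0, abs(m - (lo + hi) // 2))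
--     return min(enumerate(bands), key=lambda ib: rank(ib[1]))[0]
-- ===== Notes on version B (the rewrite author's own statement) =====
-- stated objective: simpler
-- what changed: Replaces A's two-phase selection (filter the containing bands, min by center distance, otherwise a separate min by range distance) with one total ordering: each band gets a lexicographic rank (containment flag, distance) and a single argmin over enumerate(bands) decides.
import Mathlib
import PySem

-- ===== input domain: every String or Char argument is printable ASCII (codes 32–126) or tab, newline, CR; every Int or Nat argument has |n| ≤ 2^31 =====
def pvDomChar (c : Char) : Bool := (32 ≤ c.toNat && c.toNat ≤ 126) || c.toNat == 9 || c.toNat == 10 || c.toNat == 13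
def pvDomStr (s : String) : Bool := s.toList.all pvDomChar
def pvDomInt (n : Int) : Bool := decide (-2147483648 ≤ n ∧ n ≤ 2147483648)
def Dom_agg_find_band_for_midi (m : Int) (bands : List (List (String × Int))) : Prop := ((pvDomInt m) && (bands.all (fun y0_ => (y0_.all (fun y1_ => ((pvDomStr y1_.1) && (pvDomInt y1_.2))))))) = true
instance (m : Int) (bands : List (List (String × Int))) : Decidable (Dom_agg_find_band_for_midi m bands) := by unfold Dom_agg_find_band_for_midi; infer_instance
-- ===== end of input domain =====

-- B replaces A's two-phase selection (filter containing + two keyed mins) by one argmin under a lexicographic rank (containment flag, distance); objective: simpler.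


-- b["key"]: lookup in the dict built from the pair list (Python dict(pairs): last value wins);
-- the key is present under Pre_ wherever it is read, default 0 elsewhere
def bandGet (b : List (String × Int)) (k : String) : Int := ((PySem.Dict.ofList b).get? k).getD 0

-- ===== PORT A =====
def distToRange (m : Int) (b : List (String × Int)) : Int :=
  if m < bandGet b "midi_lo" then bandGet b "midi_lo" - m
  else if m > bandGet b "midi_hi" then m - bandGet b "midi_hi"
  else 0

def agg_find_band_for_midi (m : Int) (bands : List (List (String × Int))) : Int :=
  let containing := (PySem.List.enumerate bands).filter
    (fun ib => decide (bandGet ib.2 "midi_lo" ≤ m ∧ m ≤ bandGet ib.2 "midi_hi"))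
  if containing ≠ [] then
    match PySem.List.min? containing
        (fun ib => |m - PySem.Int.floordiv (bandGet ib.2 "midi_lo" + bandGet ib.2 "midi_hi") 2|) with
    | some ib => ib.1
    | none => 0     -- unreachable: containing ≠ []
  else
    match PySem.List.min? (PySem.List.enumerate bands) (fun ib => distToRange m ib.2) with
    | some ib => ib.1
    | none => 0     -- Python raises ValueError here (bands = []); excluded by Pre_

-- ===== PORT B =====
-- rank(b): lexicographic rank (containment flag, distance)
def pyRank (m : Int) (b : List (String × Int)) : Int × Int :=
  let lo := bandGet b "midi_lo"
  if m < lo then (1, lo - m)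
  else
    let hi := bandGet b "midi_hi"
    if m > hi then (1, m - hi)
    else (0, |m - PySem.Int.floordiv (lo + hi) 2|)

-- min(enumerate(bands), key=lambda ib: rank(ib[1]))[0]: tuple key → PySem.List.min2?
def agg_find_band_for_midi_alt (m : Int) (bands : List (List (String × Int))) : Int :=
  match PySem.List.min2? (PySem.List.enumerate bands)
      (fun ib => (pyRank m ib.2).1) (fun ib => (pyRank m ib.2).2) with
  | some ib => ib.1
  | none => 0     -- Python min raises ValueError here (bands = []); excluded by Pre_

-- ===== PRECONDITION & SPEC =====
-- Pre_ excludes exactly the inputs where Python A raises: empty bands (ValueError from min) and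
-- bands missing "midi_lo", or missing "midi_hi" when A's short-circuit reads it (lo ≤ m) (KeyError).
def Pre_agg_find_band_for_midi (m : Int) (bands : List (List (String × Int))) : Prop :=
  bands ≠ [] ∧ ∀ b ∈ bands, "midi_lo" ∈ b.map Prod.fst ∧
    (bandGet b "midi_lo" ≤ m → "midi_hi" ∈ b.map Prod.fst)
instance (m : Int) (bands : List (List (String × Int))) : Decidable (Pre_agg_find_band_for_midi m bands) := by unfold Pre_agg_find_band_for_midi; infer_instance

def pvWitness_agg_find_band_for_midi : Int × (List (List (String × Int))) :=
  (62, [[("midi_lo", 40), ("midi_hi", 60)], [("midi_lo", 55), ("midi_hi", 70)]])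

def Spec_agg_find_band_for_midi (m : Int) (bands : List (List (String × Int))) (out : Int) : Prop := out = agg_find_band_for_midi_alt m bands
instance (m : Int) (bands : List (List (String × Int))) (out : Int) : Decidable (Spec_agg_find_band_for_midi m bands out) := by unfold Spec_agg_find_band_for_midi; infer_instance

-- ===== CLAIM (what is proved, stated in full; the proofs are below) =====
def Claim_equal_agg_find_band_for_midi : Prop := ∀ (m : Int) (bands : List (List (String × Int))), Dom_agg_find_band_for_midi m bands → Pre_agg_find_band_for_midi m bands → Spec_agg_find_band_for_midi m bands (agg_find_band_for_midi m bands)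

-- ===== LEMMAS AND PROOFS =====

-- the containment test A filters with
def pContain (m : Int) (ib : Int × List (String × Int)) : Bool :=
  decide (bandGet ib.2 "midi_lo" ≤ m ∧ m ≤ bandGet ib.2 "midi_hi")

theorem pyRank_of_contain (m : Int) (ib : Int × List (String × Int)) (h : pContain m ib = true) :
    pyRank m ib.2 = (0, |m - PySem.Int.floordiv (bandGet ib.2 "midi_lo" + bandGet ib.2 "midi_hi") 2|) := by
  simp only [pContain, decide_eq_true_eq] at h
  simp [pyRank, not_lt.mpr h.1, not_lt.mpr h.2]

theorem pyRank_of_not_contain (m : Int) (ib : Int × List (String × Int)) (h : pContain m ib = false) :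
    pyRank m ib.2 = (1, distToRange m ib.2) := by
  simp only [pContain, decide_eq_false_iff_not, not_and, not_le] at h
  by_cases h1 : m < bandGet ib.2 "midi_lo"
  · simp [pyRank, distToRange, h1]
  · have h2 : bandGet ib.2 "midi_hi" < m := h (le_of_not_gt h1)
    simp [pyRank, distToRange, h1, h2]

-- one step of min? / min2? when an element is appended on the right
theorem min?_snoc {α κ : Type} [LT κ] [DecidableLT κ] (l : List α) (x : α) (key : α → κ) :
    PySem.List.min? (l ++ [x]) key
      = match PySem.List.min? l key with
        | none => some x
        | some b => if key x < key b then some x else some b := by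
  simp only [PySem.List.min?, List.foldl_append, List.foldl_cons, List.foldl_nil]
  cases l.foldl (fun acc x => match acc with
      | none => some x
      | some b => if key x < key b then some x else some b) none <;> rfl

theorem min2?_snoc {α κ₁ κ₂ : Type} [LT κ₁] [DecidableLT κ₁] [LT κ₂] [DecidableLT κ₂]
    (l : List α) (x : α) (k1 : α → κ₁) (k2 : α → κ₂) :
    PySem.List.min2? (l ++ [x]) k1 k2
      = match PySem.List.min2? l k1 k2 with
        | none => some x
        | some b => if (decide (k1 x < k1 b) || !decide (k1 b < k1 x) && decide (k2 x < k2 b)) = true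
                    then some x else some b := by
  simp only [PySem.List.min2?, List.foldl_append, List.foldl_cons, List.foldl_nil]
  cases l.foldl (fun acc x => match acc with
      | none => some x
      | some b => if (decide (k1 x < k1 b) || !decide (k1 b < k1 x) && decide (k2 x < k2 b)) = true
                  then some x else some b) none <;> rfl

-- B's single lexicographic argmin = A's staged selection, on any item list
theorem min2_split (m : Int) (e : List (Int × List (String × Int))) :
    PySem.List.min2? e (fun ib => (pyRank m ib.2).1) (fun ib => (pyRank m ib.2).2)
      = if e.filter (pContain m) = []
        then PySem.List.min? e (fun ib => distToRange m ib.2)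
        else PySem.List.min? (e.filter (pContain m))
          (fun ib => |m - PySem.Int.floordiv (bandGet ib.2 "midi_lo" + bandGet ib.2 "midi_hi") 2|) := by
  induction e using List.reverseRecOn with
  | nil => simp [PySem.List.min2?, PySem.List.min?]
  | append_singleton e x ih =>
    rw [min2?_snoc, ih, List.filter_append]
    by_cases hfe : e.filter (pContain m) = []
    · rw [if_pos hfe]
      by_cases hx : pContain m x = true
      · have hfx : List.filter (pContain m) [x] = [x] := by simp [hx]
        rw [hfx, hfe, List.nil_append, if_neg (by simp : ¬([x] : List (Int × List (String × Int))) = [])]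
        cases hb : PySem.List.min? e (fun ib => distToRange m ib.2) with
        | none => simp [PySem.List.min?]
        | some b =>
          have hbp : pContain m b = false := by
            have hmem := PySem.List.min?_mem hb
            have := List.filter_eq_nil_iff.mp hfe b hmem
            simpa using this
          simp [pyRank_of_not_contain m b hbp, pyRank_of_contain m x hx, PySem.List.min?]
      · simp only [Bool.not_eq_true] at hx
        have hfx : List.filter (pContain m) [x] = [] := by simp [hx]
        rw [hfx, List.append_nil, if_pos hfe, min?_snoc]
        cases hb : PySem.List.min? e (fun ib => distToRange m ib.2) with
        | none => rfl
        | some b =>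
          have hbp : pContain m b = false := by
            have hmem := PySem.List.min?_mem hb
            have := List.filter_eq_nil_iff.mp hfe b hmem
            simpa using this
          simp [pyRank_of_not_contain m b hbp, pyRank_of_not_contain m x hx]
    · rw [if_neg hfe]
      cases hc : PySem.List.min? (e.filter (pContain m))
          (fun ib => |m - PySem.Int.floordiv (bandGet ib.2 "midi_lo" + bandGet ib.2 "midi_hi") 2|) with
      | none => exact absurd ((PySem.List.min?_eq_none_iff _ _).mp hc) hfe
      | some c =>
        have hcp : pContain m c = true := (List.mem_filter.mp (PySem.List.min?_mem hc)).2
        by_cases hx : pContain m x = true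
        · have hfx : List.filter (pContain m) [x] = [x] := by simp [hx]
          rw [hfx, if_neg (by simp : ¬(e.filter (pContain m) ++ [x] = [])), min?_snoc, hc]
          simp [pyRank_of_contain m c hcp, pyRank_of_contain m x hx]
        · simp only [Bool.not_eq_true] at hx
          have hfx : List.filter (pContain m) [x] = [] := by simp [hx]
          rw [hfx, List.append_nil, if_neg hfe, hc]
          simp [pyRank_of_contain m c hcp, pyRank_of_not_contain m x hx]

-- ===== VERDICT (by name: the statement is the Claim_ definition above) =====
theorem agg_find_band_for_midi_spec : Claim_equal_agg_find_band_for_midi := by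
  intro m bands _ _
  unfold Spec_agg_find_band_for_midi agg_find_band_for_midi agg_find_band_for_midi_alt
  rw [min2_split m (PySem.List.enumerate bands)]
  have hp : (fun (ib : Int × List (String × Int)) =>
      decide (bandGet ib.2 "midi_lo" ≤ m ∧ m ≤ bandGet ib.2 "midi_hi")) = pContain m := rfl
  simp only [hp]
  by_cases hfe : (PySem.List.enumerate bands).filter (pContain m) = []
  · simp [hfe]
  · simp [hfe]
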